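-- pv_equiv track=rewrite | github.com/test-save-commit0/python-prompt-toolkit | src/prompt_toolkit/contrib/regular_languages/regex_parser.py | tokenize_regex
-- ===== SOURCE A (Python) =====
-- def tokenize_regex(input: str) ->list[str]:
--     """
--     Takes a string, representing a regular expression as input, and tokenizes
--     it.
--
--     :param input: string, representing a regular expression.
--     :returns: List of tokens.
--     """
--     tokens = []
--     i = 0
--     while i < len(input):
--         if input[i].isspace():
--             i += 1
--             continue
--         if input[i] == '#':
--             while i < len(input) and input[i] != '\n':
--                 i += 1
--             continue
--         if input[i] in '()|*+?{}[]':
--             tokens.append(input[i])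
--             i += 1
--         elif input[i] == '\\':
--             if i + 1 < len(input):
--                 tokens.append(input[i:i+2])
--                 i += 2
--             else:
--                 tokens.append(input[i])
--                 i += 1
--         else:
--             start = i
--             while i < len(input) and input[i] not in '()|*+?{}[]\\' and not input[i].isspace():
--                 i += 1
--             tokens.append(input[start:i])
--     return tokens
-- ===== SOURCE B (Python) =====
-- def tokenize_regex(input: str) -> list[str]:
--     """Single-pass state-machine tokenizer: one flat loop over the characters
--     with a mode (normal / comment / escape-pending) and a run buffer, instead
--     of an index-jumping loop with nested scans."""
--     SPECIALS = '()|*+?{}[]'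
--     tokens: list[str] = []
--     buf: list[str] = []
--     mode = 0  # 0 = normal, 1 = comment, 2 = escape pending
--     for c in input:
--         if mode == 2:
--             tokens.append('\\' + c)
--             mode = 0
--         elif mode == 1:
--             if c == '\n':
--                 mode = 0
--         elif c.isspace():
--             if buf:
--                 tokens.append(''.join(buf))
--                 buf = []
--         elif c == '#':
--             if buf:
--                 buf.append(c)
--             else:
--                 mode = 1
--         elif c in SPECIALS:
--             if buf:
--                 tokens.append(''.join(buf))
--                 buf = []
--             tokens.append(c)
--         elif c == '\\':
--             if buf:
--                 tokens.append(''.join(buf))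
--                 buf = []
--             mode = 2
--         else:
--             buf.append(c)
--     if mode == 2:
--         tokens.append('\\')
--     if buf:
--         tokens.append(''.join(buf))
--     return tokens
-- ===== Notes on version B (the rewrite author's own statement) =====
-- stated objective: alternative
-- what changed: Replaces A's index-jumping while loop with nested inner scans (comment skip, run scan) and slicing by a single flat for-loop state machine over the characters, carrying a mode (normal/comment/escape) and a run buffer.
import Mathlib
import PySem

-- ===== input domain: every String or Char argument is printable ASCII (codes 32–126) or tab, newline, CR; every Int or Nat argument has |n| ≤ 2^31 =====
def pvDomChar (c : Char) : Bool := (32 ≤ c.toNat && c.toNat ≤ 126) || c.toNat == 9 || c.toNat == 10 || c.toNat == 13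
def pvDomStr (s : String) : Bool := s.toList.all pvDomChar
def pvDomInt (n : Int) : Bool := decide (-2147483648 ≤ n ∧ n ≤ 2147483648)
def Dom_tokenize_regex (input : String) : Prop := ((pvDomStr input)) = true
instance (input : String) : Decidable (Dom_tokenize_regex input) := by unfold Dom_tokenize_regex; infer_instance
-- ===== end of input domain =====

-- B replaces A's index-jumping loop with nested scans by a single flat state-machine pass (alternative decomposition, same cost).
-- ===== PORT A =====
-- the special characters '()|*+?{}[]'
def pvSpecials : List Char := ['(', ')', '|', '*', '+', '?', '{', '}', '[', ']']

-- inner `while i < len(input) and input[i] != '\n'` of the comment branch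
-- (fuel = a totality guard only; the caller passes enough for the loop to finish)
def pvSkipComment (cs : List Char) (fuel : Nat) (i : Nat) : Nat :=
  match fuel with
  | 0 => i
  | f + 1 =>
    if h : i < cs.length then
      if cs[i] ≠ '\n' then pvSkipComment cs f (i + 1) else i
    else i

-- inner `while i < len(input) and input[i] not in '()|*+?{}[]\\' and not input[i].isspace()`
def pvRunEnd (cs : List Char) (fuel : Nat) (i : Nat) : Nat :=
  match fuel with
  | 0 => i
  | f + 1 =>
    if h : i < cs.length then
      if cs[i] ∉ pvSpecials ∧ cs[i] ≠ '\\' ∧ ¬ (PySem.Chars.isspace cs[i] = true) then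
        pvRunEnd cs f (i + 1)
      else i
    else i

-- outer `while i < len(input)` of A, with the token accumulator (fuel = totality guard)
def pvLoopA (cs : List Char) (fuel : Nat) (i : Nat) (tokens : List String) : List String :=
  match fuel with
  | 0 => tokens
  | f + 1 =>
    if h : i < cs.length then
      if PySem.Chars.isspace cs[i] then pvLoopA cs f (i + 1) tokens
      else if cs[i] = '#' then
        pvLoopA cs f (pvSkipComment cs cs.length i) tokens
      else if cs[i] ∈ pvSpecials then
        pvLoopA cs f (i + 1) (tokens ++ [String.ofList [cs[i]]])
      else if hbs : cs[i] = '\\' then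
        if h2 : i + 1 < cs.length then
          pvLoopA cs f (i + 2) (tokens ++ [String.ofList [cs[i], cs[i + 1]]])
        else
          pvLoopA cs f (i + 1) (tokens ++ [String.ofList [cs[i]]])
      else
        -- start = i; scan the run; append input[start:i]
        pvLoopA cs f (pvRunEnd cs cs.length i)
          (tokens ++ [String.ofList ((cs.drop i).take (pvRunEnd cs cs.length i - i))])
    else tokens

def tokenize_regex (input : String) : List String :=
  pvLoopA input.toList (input.toList.length + 1) 0 []

-- ===== PORT B =====
-- one step of B's for-loop; state = (tokens, run buffer, mode) with mode 0 = normal, 1 = comment, 2 = escape pending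
def pvStepB (st : List String × List Char × Nat) (c : Char) : List String × List Char × Nat :=
  let (tokens, buf, mode) := st
  if mode = 2 then (tokens ++ [String.ofList ['\\', c]], buf, 0)
  else if mode = 1 then (tokens, buf, if c = '\n' then 0 else 1)
  else if PySem.Chars.isspace c then
    (if buf ≠ [] then tokens ++ [String.ofList buf] else tokens, [], 0)
  else if c = '#' then
    if buf ≠ [] then (tokens, buf ++ [c], 0) else (tokens, buf, 1)
  else if c ∈ pvSpecials then
    ((if buf ≠ [] then tokens ++ [String.ofList buf] else tokens) ++ [String.ofList [c]], [], 0)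
  else if c = '\\' then
    (if buf ≠ [] then tokens ++ [String.ofList buf] else tokens, [], 2)
  else (tokens, buf ++ [c], 0)

-- the trailing `if mode == 2 … / if buf …` after B's loop
def pvFinishB (st : List String × List Char × Nat) : List String :=
  let (tokens, buf, mode) := st
  let tokens := if mode = 2 then tokens ++ ["\\"] else tokens
  if buf ≠ [] then tokens ++ [String.ofList buf] else tokens

def tokenize_regex_alt (input : String) : List String :=
  pvFinishB (input.toList.foldl pvStepB ([], [], 0))

-- ===== PRECONDITION & SPEC =====
def Spec_tokenize_regex (input : String) (out : List String) : Prop := out = tokenize_regex_alt input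
instance (input : String) (out : List String) : Decidable (Spec_tokenize_regex input out) := by unfold Spec_tokenize_regex; infer_instance

-- ===== CLAIM (what is proved, stated in full; the proofs are below) =====
def Claim_equal_tokenize_regex : Prop := ∀ (input : String), Dom_tokenize_regex input → Spec_tokenize_regex input (tokenize_regex input)

-- ===== LEMMAS AND PROOFS =====

-- a "run" character: one that A's inner run scan consumes
def pvRunChar (c : Char) : Prop := c ∉ pvSpecials ∧ c ≠ '\\' ∧ PySem.Chars.isspace c = false

lemma pvSkip_high (cs : List Char) (f i : Nat) (h : ¬ i < cs.length) :
    pvSkipComment cs f i = i := by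
  cases f <;> simp [pvSkipComment, h]

lemma pvSkip_fuel (cs : List Char) : ∀ (f g i : Nat), cs.length ≤ f + i → f ≤ g →
    pvSkipComment cs f i = pvSkipComment cs g i := by
  intro f
  induction f with
  | zero =>
    intro g i hf _
    rw [pvSkip_high cs 0 i (by omega), pvSkip_high cs g i (by omega)]
  | succ f ih =>
    intro g i hf hg
    obtain ⟨g', rfl⟩ : ∃ g', g = g' + 1 := ⟨g - 1, by omega⟩
    by_cases h : i < cs.length
    · by_cases hne : cs[i] = '\n'
      · simp [pvSkipComment, h, hne]
      · simp only [pvSkipComment, dif_pos h, ne_eq, hne, not_false_eq_true, if_true]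
        exact ih g' (i + 1) (by omega) (by omega)
    · rw [pvSkip_high cs _ i h, pvSkip_high cs _ i h]

lemma pvSkip_le (cs : List Char) : ∀ (f i : Nat), i ≤ pvSkipComment cs f i := by
  intro f
  induction f with
  | zero => intro i; simp [pvSkipComment]
  | succ f ih =>
    intro i
    simp only [pvSkipComment]
    split
    · split
      · have := ih (i + 1); omega
      · omega
    · omega

lemma pvSkipComment_step (cs : List Char) (i : Nat) (h : i < cs.length)
    (hne : cs[i] ≠ '\n') :
    pvSkipComment cs cs.length i = pvSkipComment cs cs.length (i + 1) := by
  obtain ⟨L, hL⟩ : ∃ L, cs.length = L + 1 := ⟨cs.length - 1, by omega⟩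
  conv_lhs => rw [hL]
  simp only [pvSkipComment, dif_pos h, ne_eq, hne, not_false_eq_true, if_true]
  exact pvSkip_fuel cs L cs.length (i + 1) (by omega) (by omega)

lemma pvSkipComment_stop (cs : List Char) (i : Nat)
    (h : pvSkipComment cs cs.length i < cs.length) :
    cs[pvSkipComment cs cs.length i]'h = '\n' := by
  by_cases hi : i < cs.length
  · by_cases hc : cs[i] = '\n'
    · have hj : pvSkipComment cs cs.length i = i := by
        obtain ⟨L, hL⟩ : ∃ L, cs.length = L + 1 := ⟨cs.length - 1, by omega⟩
        conv_lhs => rw [hL]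
        simp [pvSkipComment, hi, hc]
      simp only [hj] at h ⊢
      exact hc
    · have hj := pvSkipComment_step cs i hi hc
      simp only [hj] at h ⊢
      exact pvSkipComment_stop cs (i + 1) h
  · rw [pvSkip_high cs _ i hi] at h
    exact absurd h hi
termination_by cs.length - i
decreasing_by omega

lemma pvRun_high (cs : List Char) (f i : Nat) (h : ¬ i < cs.length) :
    pvRunEnd cs f i = i := by
  cases f <;> simp [pvRunEnd, h]

lemma pvRun_fuel (cs : List Char) : ∀ (f g i : Nat), cs.length ≤ f + i → f ≤ g →
    pvRunEnd cs f i = pvRunEnd cs g i := by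
  intro f
  induction f with
  | zero =>
    intro g i hf _
    rw [pvRun_high cs 0 i (by omega), pvRun_high cs g i (by omega)]
  | succ f ih =>
    intro g i hf hg
    obtain ⟨g', rfl⟩ : ∃ g', g = g' + 1 := ⟨g - 1, by omega⟩
    by_cases h : i < cs.length
    · by_cases hc : cs[i] ∉ pvSpecials ∧ cs[i] ≠ '\\' ∧ ¬ (PySem.Chars.isspace cs[i] = true)
      · simp only [pvRunEnd, dif_pos h, if_pos hc]
        exact ih g' (i + 1) (by omega) (by omega)
      · simp only [pvRunEnd, dif_pos h, if_neg hc]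
    · rw [pvRun_high cs _ i h, pvRun_high cs _ i h]

lemma pvRun_le (cs : List Char) : ∀ (f i : Nat), i ≤ pvRunEnd cs f i := by
  intro f
  induction f with
  | zero => intro i; simp [pvRunEnd]
  | succ f ih =>
    intro i
    simp only [pvRunEnd]
    split
    · split
      · have := ih (i + 1); omega
      · omega
    · omega

lemma pvRunEnd_step (cs : List Char) (i : Nat) (h : i < cs.length)
    (h1 : cs[i] ∉ pvSpecials) (h2 : cs[i] ≠ '\\') (h3 : ¬ (PySem.Chars.isspace cs[i] = true)) :
    pvRunEnd cs cs.length i = pvRunEnd cs cs.length (i + 1) := by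
  obtain ⟨L, hL⟩ : ∃ L, cs.length = L + 1 := ⟨cs.length - 1, by omega⟩
  conv_lhs => rw [hL]
  simp only [pvRunEnd, dif_pos h, if_pos (⟨h1, h2, h3⟩ : _ ∧ _ ∧ _)]
  exact pvRun_fuel cs L cs.length (i + 1) (by omega) (by omega)

lemma pvRunEnd_stop (cs : List Char) (i : Nat)
    (h : pvRunEnd cs cs.length i < cs.length) :
    ¬ pvRunChar (cs[pvRunEnd cs cs.length i]'h) := by
  by_cases hi : i < cs.length
  · by_cases hc : pvRunChar cs[i]
    · have hj := pvRunEnd_step cs i hi hc.1 hc.2.1 (by simp [hc.2.2])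
      simp only [hj] at h ⊢
      exact pvRunEnd_stop cs (i + 1) h
    · have hj : pvRunEnd cs cs.length i = i := by
        obtain ⟨L, hL⟩ : ∃ L, cs.length = L + 1 := ⟨cs.length - 1, by omega⟩
        conv_lhs => rw [hL]
        rw [pvRunEnd, dif_pos hi, if_neg]
        intro ⟨a, b, c⟩
        exact hc ⟨a, b, by simp [c]⟩
      simp only [hj] at h ⊢
      exact hc
  · rw [pvRun_high cs _ i hi] at h
    exact absurd h hi
termination_by cs.length - i
decreasing_by omega

-- folding B over a comment: the state stays (t, [], 1) until the newline the comment scan stops at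
lemma pvComment_fold (cs : List Char) (t : List String) (i : Nat) :
    (cs.drop i).foldl pvStepB (t, [], 1) =
      if pvSkipComment cs cs.length i < cs.length then
        (cs.drop (pvSkipComment cs cs.length i + 1)).foldl pvStepB (t, ([] : List Char), 0)
      else (t, [], 1) := by
  by_cases hi : i < cs.length
  · rw [List.drop_eq_getElem_cons hi]
    by_cases hc : cs[i] = '\n'
    · have hj : pvSkipComment cs cs.length i = i := by
        obtain ⟨L, hL⟩ : ∃ L, cs.length = L + 1 := ⟨cs.length - 1, by omega⟩
        conv_lhs => rw [hL]
        simp [pvSkipComment, hi, hc]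
      simp only [List.foldl_cons, pvStepB, hc, if_true, hj, hi]
      norm_num
    · have hj := pvSkipComment_step cs i hi hc
      have hstep : pvStepB (t, [], 1) cs[i] = (t, [], 1) := by simp [pvStepB, hc]
      rw [List.foldl_cons, hstep, pvComment_fold cs t (i + 1), hj]
  · have hd : cs.drop i = [] := List.drop_eq_nil_of_le (by omega)
    have hge := pvSkip_le cs cs.length i
    rw [hd, List.foldl_nil, if_neg (by omega)]
termination_by cs.length - i
decreasing_by omega

-- folding B over a run: the characters up to the end of the run go into the buffer
lemma pvRun_fold (cs : List Char) (t : List String) (i : Nat) (buf : List Char) (hb : buf ≠ []) :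
    (cs.drop i).foldl pvStepB (t, buf, 0) =
      (cs.drop (pvRunEnd cs cs.length i)).foldl pvStepB
        (t, buf ++ (cs.drop i).take (pvRunEnd cs cs.length i - i), 0) := by
  by_cases hi : i < cs.length
  · by_cases hc : pvRunChar cs[i]
    · obtain ⟨h1, h2, h3⟩ := hc
      have hj := pvRunEnd_step cs i hi h1 h2 (by simp [h3])
      have hge := pvRun_le cs cs.length (i + 1)
      have hstep : pvStepB (t, buf, 0) cs[i] = (t, buf ++ [cs[i]], 0) := by
        by_cases hh : cs[i] = '#'
        · simp [pvStepB, hh, hb, hh ▸ h3]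
        · simp [pvStepB, hh, h1, h2, h3]
      rw [List.drop_eq_getElem_cons hi, List.foldl_cons, hstep,
        pvRun_fold cs t (i + 1) (buf ++ [cs[i]]) (by simp), hj]
      have h5 : pvRunEnd cs cs.length (i + 1) - i = (pvRunEnd cs cs.length (i + 1) - (i + 1)) + 1 := by
        omega
      rw [h5, List.take_succ_cons, List.append_assoc]
      rfl
    · have hj : pvRunEnd cs cs.length i = i := by
        obtain ⟨L, hL⟩ : ∃ L, cs.length = L + 1 := ⟨cs.length - 1, by omega⟩
        conv_lhs => rw [hL]
        rw [pvRunEnd, dif_pos hi, if_neg]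
        intro ⟨a, b, c⟩
        exact hc ⟨a, b, by simp [c]⟩
      rw [hj]
      simp
  · have hd : cs.drop i = [] := List.drop_eq_nil_of_le (by omega)
    have hj : pvRunEnd cs cs.length i = i := pvRun_high cs _ i hi
    rw [hj, hd]
    simp
termination_by cs.length - i
decreasing_by omega

-- flushing the buffer early commutes with the rest of the fold, provided the next
-- character (if any) is a token boundary (space, special, or backslash)
lemma pvFlush (l : List Char) (t : List String) (buf : List Char) (hb : buf ≠ [])
    (hl : l = [] ∨ ∃ d l', l = d :: l' ∧ ¬ pvRunChar d) :
    pvFinishB (l.foldl pvStepB (t, buf, 0)) =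
      pvFinishB (l.foldl pvStepB (t ++ [String.ofList buf], [], 0)) := by
  rcases hl with hnil | ⟨d, l', rfl, hd⟩
  · subst hnil
    simp [pvFinishB, hb]
  · have hstates : pvStepB (t, buf, 0) d = pvStepB (t ++ [String.ofList buf], [], 0) d := by
      by_cases hs : PySem.Chars.isspace d = true
      · simp [pvStepB, hs, hb]
      · by_cases hsp : d ∈ pvSpecials
        · have hhash : d ≠ '#' := by
            intro h; subst h; revert hsp; decide
          simp [pvStepB, hs, hsp, hhash, hb]
        · have hbs : d = '\\' := by
            by_cases hbs : d = '\\'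
            · exact hbs
            · exact absurd ⟨hsp, hbs, by simp [hs]⟩ hd
          subst hbs
          have hs2 : PySem.Chars.isspace '\\' = false := by decide
          have hh2 : ('\\' : Char) ≠ '#' := by decide
          simp [pvStepB, hs2, hsp, hh2, hb]
    rw [List.foldl_cons, List.foldl_cons, hstates]

-- the main simulation: A's loop from position i (with enough fuel) equals B's fold over the suffix
lemma pvMain (cs : List Char) : ∀ (f i : Nat) (t : List String), cs.length + 1 - i ≤ f →
    pvLoopA cs f i t = pvFinishB ((cs.drop i).foldl pvStepB (t, [], 0)) := by
  intro f
  induction f with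
  | zero =>
    intro i t hn
    have hi : ¬ i < cs.length := by omega
    rw [List.drop_eq_nil_of_le (by omega)]
    simp [pvLoopA, pvFinishB]
  | succ f ih =>
    intro i t hn
    by_cases hi : i < cs.length
    · rw [pvLoopA, dif_pos hi, List.drop_eq_getElem_cons hi, List.foldl_cons]
      by_cases h1 : PySem.Chars.isspace cs[i] = true
      · rw [if_pos h1]
        have hstep : pvStepB (t, [], 0) cs[i] = (t, [], 0) := by simp [pvStepB, h1]
        rw [hstep, ih (i + 1) t (by omega)]
      · rw [if_neg h1]
        by_cases h2 : cs[i] = '#'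
        · rw [if_pos h2]
          have hstep : pvStepB (t, [], 0) cs[i] = (t, [], 1) := by
            have hs : PySem.Chars.isspace '#' = false := by decide
            simp [pvStepB, h2, hs]
          rw [hstep, pvComment_fold cs t (i + 1)]
          have hjj := pvSkipComment_step cs i hi (by simp [h2])
          have hge := pvSkip_le cs cs.length (i + 1)
          rw [← hjj]
          by_cases hjl : pvSkipComment cs cs.length i < cs.length
          · rw [if_pos hjl]
            have hnl := pvSkipComment_stop cs i hjl
            rw [ih (pvSkipComment cs cs.length i) t (by omega),
              List.drop_eq_getElem_cons hjl, List.foldl_cons]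
            have hsnl : pvStepB (t, [], 0) (cs[pvSkipComment cs cs.length i]'hjl) = (t, [], 0) := by
              rw [hnl]
              have : PySem.Chars.isspace '\n' = true := by decide
              simp [pvStepB, this]
            rw [hsnl]
          · rw [if_neg hjl, ih (pvSkipComment cs cs.length i) t (by omega),
              List.drop_eq_nil_of_le (by omega), List.foldl_nil]
            simp [pvFinishB]
        · rw [if_neg h2]
          by_cases h3 : cs[i] ∈ pvSpecials
          · rw [if_pos h3]
            have hstep : pvStepB (t, [], 0) cs[i] = (t ++ [String.ofList [cs[i]]], [], 0) := by
              simp [pvStepB, h1, h2, h3]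
            rw [hstep, ih (i + 1) _ (by omega)]
          · rw [if_neg h3]
            by_cases h4 : cs[i] = '\\'
            · rw [dif_pos h4]
              have hstep : pvStepB (t, [], 0) cs[i] = (t, [], 2) := by
                have hs : PySem.Chars.isspace '\\' = false := by decide
                have hsp : ('\\' : Char) ∉ pvSpecials := by decide
                have hh : ('\\' : Char) ≠ '#' := by decide
                simp [pvStepB, h4, hs, hsp, hh]
              rw [hstep]
              by_cases h5 : i + 1 < cs.length
              · rw [dif_pos h5, List.drop_eq_getElem_cons h5, List.foldl_cons]
                have hstep2 : pvStepB (t, [], 2) cs[i + 1]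
                    = (t ++ [String.ofList ['\\', cs[i + 1]]], [], 0) := by
                  simp [pvStepB]
                rw [hstep2, ih (i + 2) _ (by omega), h4]
              · rw [dif_neg h5, List.drop_eq_nil_of_le (by omega), List.foldl_nil,
                  ih (i + 1) _ (by omega), List.drop_eq_nil_of_le (by omega), List.foldl_nil]
                simp [pvFinishB, h4]
            · rw [dif_neg h4]
              have hstep : pvStepB (t, [], 0) cs[i] = (t, [cs[i]], 0) := by
                simp [pvStepB, h1, h2, h3, h4]
              have hjj := pvRunEnd_step cs i hi h3 h4 (by simp [h1])
              have hge := pvRun_le cs cs.length (i + 1)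
              have hbound : cs.drop (pvRunEnd cs cs.length i) = [] ∨
                  ∃ d l', cs.drop (pvRunEnd cs cs.length i) = d :: l' ∧ ¬ pvRunChar d := by
                by_cases hjl : pvRunEnd cs cs.length i < cs.length
                · exact Or.inr ⟨_, _, List.drop_eq_getElem_cons hjl, pvRunEnd_stop cs i hjl⟩
                · exact Or.inl (List.drop_eq_nil_of_le (by omega))
              have htok : (cs[i] :: cs.drop (i + 1)).take (pvRunEnd cs cs.length i - i)
                  = [cs[i]] ++ (cs.drop (i + 1)).take (pvRunEnd cs cs.length i - (i + 1)) := by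
                have h5 : pvRunEnd cs cs.length i - i = (pvRunEnd cs cs.length i - (i + 1)) + 1 := by
                  omega
                rw [h5, List.take_succ_cons]
                rfl
              rw [hstep, pvRun_fold cs t (i + 1) [cs[i]] (by simp), ← hjj, htok,
                ih (pvRunEnd cs cs.length i) _ (by omega),
                pvFlush (cs.drop (pvRunEnd cs cs.length i)) t _ (by simp) hbound]
    · rw [pvLoopA, dif_neg hi, List.drop_eq_nil_of_le (by omega)]
      simp [pvFinishB]

-- ===== VERDICT (by name: the statement is the Claim_ definition above) =====
theorem tokenize_regex_spec : Claim_equal_tokenize_regex := by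
  intro input _
  unfold Spec_tokenize_regex tokenize_regex tokenize_regex_alt
  simpa using pvMain input.toList (input.toList.length + 1) 0 [] (by omega)
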